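-- pv_equiv track=rewrite | github.com/mfmssb/advent-of-code | Advent of Code 2024/07 - Solved/solution.py | insert_operators
-- ===== SOURCE A (Python) =====
-- from itertools import product
--
-- def insert_operators(numbers: list, operators=['+', '*']) -> list:
--     operator_combinations = list(product(operators, repeat=len(numbers)-1))
--     results = []
--     for combo in operator_combinations:
--         parts = []
--         for i, n in enumerate(numbers):
--             parts.append(str(n))
--             if i < len(combo):
--                 parts.append(combo[i])
--         results.append(parts)
--     return results
-- ===== SOURCE B (Python) =====
-- def insert_operators(numbers: list, operators=['+', '*']) -> list:
--     # Recursive decomposition: one depth-first pass over the numbers instead of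
--     # materialising all operator combinations with itertools.product.
--     if len(numbers) == 1:
--         return [[str(numbers[0])]]
--     head, *rest = numbers
--     return [[str(head), op] + tail
--             for op in operators
--             for tail in insert_operators(rest, operators)]
-- ===== Notes on version B (the rewrite author's own statement) =====
-- stated objective: alternative
-- what changed: B replaces itertools.product over operator combinations plus an indexed interleaving loop by a single depth-first recursion on the numbers list that builds each part-list directly.
import Mathlib
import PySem

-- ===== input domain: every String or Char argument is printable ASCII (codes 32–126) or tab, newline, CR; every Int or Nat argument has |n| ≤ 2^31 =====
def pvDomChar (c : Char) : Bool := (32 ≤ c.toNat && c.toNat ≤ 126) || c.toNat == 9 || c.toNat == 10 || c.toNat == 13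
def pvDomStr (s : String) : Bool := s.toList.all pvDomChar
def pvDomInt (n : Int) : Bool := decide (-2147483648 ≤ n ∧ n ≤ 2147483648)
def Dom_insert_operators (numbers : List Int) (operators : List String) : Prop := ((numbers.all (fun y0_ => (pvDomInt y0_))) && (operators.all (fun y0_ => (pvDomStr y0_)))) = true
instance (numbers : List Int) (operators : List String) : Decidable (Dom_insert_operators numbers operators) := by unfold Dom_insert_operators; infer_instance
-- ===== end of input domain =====

-- B builds the result by a single depth-first recursion on the numbers list instead of
-- itertools.product plus an indexed interleaving loop (objective: alternative decomposition).

-- ===== PORT A =====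
-- itertools.product(operators, repeat=n): first element varies slowest (lexicographic order)
def pyProductRepeat (operators : List String) : Nat → List (List String)
  | 0 => [[]]
  | n + 1 => operators.flatMap (fun a => (pyProductRepeat operators n).map (fun rest => a :: rest))

def insert_operators (numbers : List Int) (operators : List String) : List (List String) :=
  let operator_combinations := pyProductRepeat operators (numbers.length - 1)
  operator_combinations.foldl (fun results combo =>
    let parts := (PySem.List.enumerate numbers).foldl (fun parts p =>
      let parts := parts ++ [PySem.Int.toStr p.2]
      if p.1 < (combo.length : Int) then parts ++ [PySem.List.pyGetD combo p.1 ""] else parts) []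
    results ++ [parts]) []

-- ===== PORT B =====
def insert_operators_alt (numbers : List Int) (operators : List String) : List (List String) :=
  match numbers with
  | [x] => [[PySem.Int.toStr x]]
  | x :: rest =>
      operators.flatMap (fun op =>
        (insert_operators_alt rest operators).map (fun tail => PySem.Int.toStr x :: op :: tail))
  | [] => []   -- unreachable under Pre_: the Python B raises ValueError unpacking an empty list

-- ===== PRECONDITION & SPEC =====
-- Pre_ excludes the empty numbers list, on which Python A raises ValueError
-- (itertools.product with repeat = -1) and Python B also raises ValueError.
def Pre_insert_operators (numbers : List Int) (operators : List String) : Prop := numbers ≠ []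
instance (numbers : List Int) (operators : List String) : Decidable (Pre_insert_operators numbers operators) := by unfold Pre_insert_operators; infer_instance
def pvWitness_insert_operators : List Int × List String := ([1, 2], ["+", "*"])

def Spec_insert_operators (numbers : List Int) (operators : List String) (out : List (List String)) : Prop := out = insert_operators_alt numbers operators
instance (numbers : List Int) (operators : List String) (out : List (List String)) : Decidable (Spec_insert_operators numbers operators out) := by unfold Spec_insert_operators; infer_instance

-- ===== CLAIM (what is proved, stated in full; the proofs are below) =====
def Claim_equal_insert_operators : Prop := ∀ (numbers : List Int) (operators : List String), Dom_insert_operators numbers operators → Pre_insert_operators numbers operators → Spec_insert_operators numbers operators (insert_operators numbers operators)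

-- ===== LEMMAS AND PROOFS =====

-- the interleaving that A's inner loop produces when the combo has length numbers.length - 1
def interOps : List Int → List String → List String
  | [], _ => []
  | n :: _, [] => [PySem.Int.toStr n]
  | n :: ns, c :: cs => PySem.Int.toStr n :: c :: interOps ns cs

theorem length_mem_pyProductRepeat (operators : List String) :
    ∀ (n : Nat) (combo : List String), combo ∈ pyProductRepeat operators n → combo.length = n := by
  intro n
  induction n with
  | zero => intro combo h; simp [pyProductRepeat] at h; simp [h]
  | succ m ih =>
    intro combo h
    simp [pyProductRepeat] at h
    obtain ⟨a, -, c, hc, rfl⟩ := h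
    simp [ih c hc]

theorem inner_loop_eq (combo : List String) :
    ∀ (ns : List Int) (k : Nat) (acc : List String), k + ns.length = combo.length + 1 →
    (PySem.List.enumerate ns (k : Int)).foldl (fun parts p =>
      if p.1 < (combo.length : Int) then parts ++ [PySem.Int.toStr p.2] ++ [PySem.List.pyGetD combo p.1 ""]
      else parts ++ [PySem.Int.toStr p.2])
      acc = acc ++ interOps ns (combo.drop k) := by
  intro ns
  induction ns with
  | nil => intro k acc h; simp [PySem.List.enumerate_nil, interOps]
  | cons n ns ih =>
    intro k acc h
    rw [PySem.List.enumerate_cons, List.foldl_cons]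
    cases ns with
    | nil =>
      have hk : k = combo.length := by simpa using h
      subst hk
      simp [PySem.List.enumerate_nil, interOps, List.drop_length]
    | cons m ms =>
      have hk : k < combo.length := by simp at h; omega
      have hlt : (k : Int) < (combo.length : Int) := by exact_mod_cast hk
      have hget : PySem.List.pyGetD combo (k : Int) "" = combo[k] := by
        rw [PySem.List.pyGetD_eq_getElem combo "" (by positivity) (by exact_mod_cast hk)]
        simp
      have hdrop : combo.drop k = combo[k] :: combo.drop (k + 1) :=
        (List.getElem_cons_drop hk).symm
      simp only [if_pos hlt, hget]
      have hc : ((k : Int) + 1) = ((k + 1 : Nat) : Int) := by push_cast; ring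
      rw [hc, ih (k + 1) (acc ++ [PySem.Int.toStr n] ++ [combo[k]]) (by simp at h ⊢; omega)]
      rw [hdrop]
      simp [interOps]

theorem a_eq_map_inter (numbers : List Int) (operators : List String) (h : numbers ≠ []) :
    insert_operators numbers operators
      = (pyProductRepeat operators (numbers.length - 1)).map (interOps numbers) := by
  unfold insert_operators
  rw [PySem.List.foldl_append_singleton_eq_map]
  apply List.map_congr_left
  intro combo hc
  have hlen := length_mem_pyProductRepeat operators _ combo hc
  have h0 : (0 : Nat) + numbers.length = combo.length + 1 := by
    have : numbers.length ≠ 0 := by simpa using congrArg List.length |>.mt (by intro q; exact h (List.length_eq_zero_iff.mp q))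
    omega
  have := inner_loop_eq combo numbers 0 [] h0
  simpa using this

theorem alt_eq_map_inter (numbers : List Int) (operators : List String) (h : numbers ≠ []) :
    insert_operators_alt numbers operators
      = (pyProductRepeat operators (numbers.length - 1)).map (interOps numbers) := by
  induction numbers with
  | nil => exact absurd rfl h
  | cons x rest ih =>
    cases rest with
    | nil => simp [insert_operators_alt, pyProductRepeat, interOps]
    | cons y ms =>
      rw [insert_operators_alt]
      have hr : (y :: ms).length - 1 + 1 = (y :: ms).length := by simp
      have hlen : (x :: y :: ms).length - 1 = ((y :: ms).length - 1) + 1 := by simp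
      rw [hlen, pyProductRepeat, List.map_flatMap]
      rw [ih (by simp only [ne_eq, List.cons_ne_nil, not_false_eq_true])]
      apply List.flatMap_congr
      intro a _
      rw [List.map_map, List.map_map]
      apply List.map_congr_left
      intro c _
      simp [interOps]
      · intro q; simp at q

-- ===== VERDICT (by name: the statement is the Claim_ definition above) =====
theorem insert_operators_spec : Claim_equal_insert_operators := by
  intro numbers operators _ hpre
  unfold Spec_insert_operators
  rw [a_eq_map_inter numbers operators hpre, alt_eq_map_inter numbers operators hpre]
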